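-- pv_equiv track=rewrite | github.com/rebuilder945/FL_research | ast_research/python_code_5.23/lastterm_page7/success_code/杨立仞-3225-2023-04-24_15_04_52.py | work
-- ===== SOURCE A (Python) =====
-- def work(a) :
--     c={}
--     d=1
--     c[0]=1
--     for b in range(1,a+1):
--         for i in range(1,b):
--             d*=i
--         c[b]=d
--
--
--     return c
-- ===== SOURCE B (Python) =====
-- def work(a):
--     c = {0: 1}
--     f = 1  # factorial of the previous b, i.e. (b-1)!
--     p = 1  # running product of factorials 1! * 2! * ... * (b-1)!... (= A's d)
--     for b in range(1, a + 1):
--         p *= f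
--         c[b] = p
--         f *= b
--     return c
-- ===== Notes on version B (the rewrite author's own statement) =====
-- stated objective: faster
-- what changed: Replaces the nested loop that recomputes the factorial product from scratch for every b with a single pass maintaining an incremental factorial and a running product.
import Mathlib
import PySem

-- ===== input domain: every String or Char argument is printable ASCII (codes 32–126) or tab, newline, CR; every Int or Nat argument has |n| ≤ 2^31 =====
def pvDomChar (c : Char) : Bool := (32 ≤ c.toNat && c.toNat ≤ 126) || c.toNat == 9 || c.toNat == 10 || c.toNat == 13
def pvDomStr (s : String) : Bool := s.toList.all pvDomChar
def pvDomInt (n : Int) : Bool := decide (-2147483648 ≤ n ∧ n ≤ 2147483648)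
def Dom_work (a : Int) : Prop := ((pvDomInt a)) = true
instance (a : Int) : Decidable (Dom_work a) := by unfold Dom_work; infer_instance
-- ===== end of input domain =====

-- B replaces A's nested loop (recomputing the factorial product for each b) by one pass
-- maintaining an incremental factorial and a running product: O(a) instead of O(a^2) multiplications.

-- ===== PORT A =====
-- state: (d, c)
def work (a : Int) : List (Int × Int) :=
  let c : PySem.Dict Int Int := PySem.Dict.insert PySem.Dict.empty 0 1
  let st := (PySem.List.pyRange 1 (a + 1) 1).foldl
    (fun (st : Int × PySem.Dict Int Int) b =>
      let d := (PySem.List.pyRange 1 b 1).foldl (fun d i => d * i) st.1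
      (d, PySem.Dict.insert st.2 b d))
    (1, c)
  st.2.items

-- ===== PORT B =====
-- state: (f, p, c)
def work_alt (a : Int) : List (Int × Int) :=
  let st := (PySem.List.pyRange 1 (a + 1) 1).foldl
    (fun (st : Int × Int × PySem.Dict Int Int) b =>
      let p := st.2.1 * st.1
      (st.1 * b, p, PySem.Dict.insert st.2.2 b p))
    (1, 1, PySem.Dict.insert PySem.Dict.empty 0 1)
  st.2.2.items

-- ===== PRECONDITION & SPEC =====
def Spec_work (a : Int) (out : List (Int × Int)) : Prop := out = work_alt a
instance (a : Int) (out : List (Int × Int)) : Decidable (Spec_work a out) := by unfold Spec_work; infer_instance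

-- ===== CLAIM (what is proved, stated in full; the proofs are below) =====
def Claim_equal_work : Prop := ∀ (a : Int), Dom_work a → Spec_work a (work a)

-- ===== LEMMAS AND PROOFS =====

def pvFac : Nat → Int
  | 0 => 1
  | n + 1 => pvFac n * ((n : Int) + 1)

lemma pvProd_range (n : Nat) (d : Int) :
    (PySem.List.pyRange 1 (1 + (n : Int)) 1).foldl (fun d i => d * i) d = d * pvFac n := by
  induction n generalizing d with
  | zero => simp [PySem.List.pyRange_one_eq_nil, pvFac]
  | succ n ih =>
      have h : (1 : Int) ≤ 1 + (n : Int) := by omega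
      have : (1 : Int) + ((n : Nat) + 1 : Nat) = (1 + (n : Int)) + 1 := by push_cast; ring
      rw [this, PySem.List.pyRange_one_succ_right h, List.foldl_append, ih]
      simp [pvFac]; ring

lemma pvMain (n : Nat) :
    (PySem.List.pyRange 1 (1 + (n : Int)) 1).foldl
      (fun (st : Int × Int × PySem.Dict Int Int) b =>
        (st.1 * b, st.2.1 * st.1, PySem.Dict.insert st.2.2 b (st.2.1 * st.1)))
      (1, 1, PySem.Dict.insert PySem.Dict.empty 0 1)
    = (pvFac n,
       ((PySem.List.pyRange 1 (1 + (n : Int)) 1).foldl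
          (fun (st : Int × PySem.Dict Int Int) b =>
            ((PySem.List.pyRange 1 b 1).foldl (fun d i => d * i) st.1,
             PySem.Dict.insert st.2 b ((PySem.List.pyRange 1 b 1).foldl (fun d i => d * i) st.1)))
          (1, PySem.Dict.insert PySem.Dict.empty 0 1))) := by
  induction n with
  | zero => simp [PySem.List.pyRange_one_eq_nil, pvFac]
  | succ n ih =>
      have h : (1 : Int) ≤ 1 + (n : Int) := by omega
      have hcast : (1 : Int) + ((n : Nat) + 1 : Nat) = (1 + (n : Int)) + 1 := by push_cast; ring
      rw [hcast, PySem.List.pyRange_one_succ_right h, List.foldl_append, List.foldl_append, ih]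
      simp only [List.foldl_cons, List.foldl_nil]
      rw [pvProd_range n]
      rw [Prod.mk.injEq]
      refine ⟨?_, rfl⟩
      simp [pvFac]
      exact Or.inl (by omega)

theorem work_spec_aux (a : Int) : work a = work_alt a := by
  unfold work work_alt
  by_cases h : a ≤ 0
  · have : PySem.List.pyRange 1 (a + 1) 1 = [] := by
      apply PySem.List.pyRange_one_eq_nil; omega
    simp [this]
  · have ha : a = ((a.toNat : Nat) : Int) := by omega
    have h1 : a + 1 = 1 + ((a.toNat : Nat) : Int) := by omega
    rw [h1, pvMain a.toNat]

-- ===== VERDICT (by name: the statement is the Claim_ definition above) =====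
theorem work_spec : Claim_equal_work := by
  intro a _
  unfold Spec_work
  exact work_spec_aux a
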